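-- pv_equiv track=rewrite | github.com/stepondust/AIHandWriting | PatternMiningHandWriting/Apriori.py | allProperSubset
-- ===== SOURCE A (Python) =====
-- def allProperSubset(superset):
--     n = len(superset)
--     subset = []
--     for i in range(1, 2 ** n - 1):  # 子集个数, 每循环一次一个子集
--         combo = []
--         for j in range(n):  # 用来判断二进制下标为 j 的位置数是否为 1
--             if (i >> j) % 2:
--                 combo.append(superset[j])
--         subset.append(tuple(combo))
--     return subset
-- ===== SOURCE B (Python) =====
-- def allProperSubset(superset):
--     # iterative doubling: powerset in bitmask order, then drop empty (first) and full (last)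
--     result = [()]
--     for x in superset:
--         result = result + [r + (x,) for r in result]
--     return result[1:-1]
-- ===== Notes on version B (the rewrite author's own statement) =====
-- stated objective: alternative
-- what changed: Replaces per-mask bit-testing enumeration (for each i in 1..2^n-2, scan all n bit positions) with iterative powerset doubling (result = result + [r+(x,) for r in result] per element), then a [1:-1] slice drops the empty and full subsets.
import Mathlib
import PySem

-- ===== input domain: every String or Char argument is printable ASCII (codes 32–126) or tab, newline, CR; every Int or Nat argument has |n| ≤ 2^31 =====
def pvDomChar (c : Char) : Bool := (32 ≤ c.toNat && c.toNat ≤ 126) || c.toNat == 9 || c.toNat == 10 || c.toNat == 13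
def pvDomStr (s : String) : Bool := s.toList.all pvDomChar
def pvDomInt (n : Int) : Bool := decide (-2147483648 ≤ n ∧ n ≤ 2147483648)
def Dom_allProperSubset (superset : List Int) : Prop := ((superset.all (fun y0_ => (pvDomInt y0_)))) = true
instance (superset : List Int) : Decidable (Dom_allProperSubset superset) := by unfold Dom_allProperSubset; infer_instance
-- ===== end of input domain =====

-- B replaces A's per-mask bit-testing enumeration by iterative powerset doubling plus a [1:-1] slice (alternative decomposition, same output).

-- ===== PORT A =====
-- Python's  i >> j  on Int with a Nat shift amount (exact: Lean's >>> floors like Python's >>)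
def pyShr (a : Int) (k : Nat) : Int := a >>> k

def allProperSubset (superset : List Int) : List (List Int) :=
  let n := superset.length
  (PySem.List.pyRange 1 ((2 : Int) ^ n - 1) 1).foldl (fun subset i =>
    let combo := (PySem.List.pyRange 0 (n : Int) 1).foldl (fun combo j =>
      if PySem.Int.mod (pyShr i j.toNat) 2 ≠ 0 then combo ++ [PySem.List.pyGetD superset j 0]
      else combo) ([] : List Int)
    subset ++ [combo]) []

-- ===== PORT B =====
def allProperSubset_alt (superset : List Int) : List (List Int) :=
  let result := superset.foldl (fun result x => result ++ result.map (fun r => r ++ [x])) [[]]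
  PySem.List.slice result (some 1) (some (-1))

-- ===== PRECONDITION & SPEC =====
def Spec_allProperSubset (superset : List Int) (out : List (List Int)) : Prop := out = allProperSubset_alt superset
instance (superset : List Int) (out : List (List Int)) : Decidable (Spec_allProperSubset superset out) := by unfold Spec_allProperSubset; infer_instance

-- ===== CLAIM (what is proved, stated in full; the proofs are below) =====
def Claim_equal_allProperSubset : Prop := ∀ (superset : List Int), Dom_allProperSubset superset → Spec_allProperSubset superset (allProperSubset superset)

-- ===== LEMMAS AND PROOFS =====

-- the subset of xs selected by the bits of mask i (bit j picks xs[j])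
def pvSel (xs : List Int) (i : Nat) : List Int :=
  match xs with
  | [] => []
  | x :: t => (if i % 2 = 1 then [x] else []) ++ pvSel t (i / 2)

theorem pv_innerNat (xs : List Int) : ∀ (i : Nat) (acc : List Int),
    (List.range xs.length).foldl
      (fun c j => if (i >>> j) % 2 = 1 then c ++ [xs.getD j 0] else c) acc
    = acc ++ pvSel xs i := by
  induction xs with
  | nil => intro i acc; simp [pvSel]
  | cons x t ih =>
    intro i acc
    have hsucc : ∀ (j : Nat), i >>> (j + 1) = (i / 2) >>> j := by
      intro j
      rw [show j + 1 = 1 + j from by omega, Nat.shiftRight_add, Nat.shiftRight_one]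
    simp only [List.length_cons, List.range_succ_eq_map, List.foldl_cons, List.foldl_map,
      Nat.succ_eq_add_one, hsucc, List.getD_cons_succ, List.getD_cons_zero, Nat.shiftRight_zero]
    rw [ih (i / 2)]
    by_cases h : i % 2 = 1 <;> simp [pvSel, h]

theorem pv_cond (i k : Nat) :
    (PySem.Int.mod (pyShr ((i : Nat) : Int) k) 2 ≠ 0) ↔ ((i >>> k) % 2 = 1) := by
  have h : pyShr ((i : Nat) : Int) k = ((i >>> k : Nat) : Int) := by
    unfold pyShr; rw [Int.natCast_shiftRight]
  rw [h, show (2 : Int) = ((2 : Nat) : Int) from rfl, PySem.Int.mod_natCast]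
  have h2 := Nat.mod_two_eq_zero_or_one (i >>> k)
  simp only [ne_eq, Int.natCast_eq_zero]
  rcases h2 with h2 | h2 <;> simp [h2]

theorem pv_inner (xs : List Int) (ii : Int) (hnn : 0 ≤ ii) :
    (PySem.List.pyRange 0 (xs.length : Int) 1).foldl
      (fun c j => if PySem.Int.mod (pyShr ii j.toNat) 2 ≠ 0 then c ++ [PySem.List.pyGetD xs j 0] else c)
      ([] : List Int)
    = pvSel xs ii.toNat := by
  obtain ⟨i, rfl⟩ : ∃ i : Nat, ii = (i : Int) := ⟨ii.toNat, (Int.toNat_of_nonneg hnn).symm⟩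
  rw [Int.toNat_natCast]
  rw [PySem.List.pyRange_one, List.foldl_map]
  have hb : ∀ (c : List Int) (k : Nat),
      (if PySem.Int.mod (pyShr ((i : Nat) : Int) ((0 : Int) + (k : Int)).toNat) 2 ≠ 0
       then c ++ [PySem.List.pyGetD xs ((0 : Int) + (k : Int)) 0] else c)
      = (if (i >>> k) % 2 = 1 then c ++ [xs.getD k 0] else c) := by
    intro c k
    rw [show ((0 : Int) + (k : Int)) = (k : Int) from by ring]
    rw [show ((k : Int)).toNat = k from Int.toNat_natCast k]
    rw [PySem.List.pyGetD_natCast]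
    exact if_congr (pv_cond i k) rfl rfl
  simp only [hb]
  rw [show ((xs.length : Int) - 0).toNat = xs.length from by omega]
  rw [pv_innerNat]
  rw [List.nil_append]

theorem pv_sel_snoc_lo (xs : List Int) (x : Int) : ∀ (i : Nat), i < 2 ^ xs.length →
    pvSel (xs ++ [x]) i = pvSel xs i := by
  induction xs with
  | nil =>
    intro i hi
    have : i = 0 := by simpa using hi
    subst this
    simp [pvSel]
  | cons y t ih =>
    intro i hi
    have hp : 2 ^ (y :: t).length = 2 ^ t.length * 2 := by simp [pow_succ]
    have h2 : i / 2 < 2 ^ t.length := by omega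
    simp only [List.cons_append, pvSel, ih (i / 2) h2]

theorem pv_sel_snoc_hi (xs : List Int) (x : Int) : ∀ (i : Nat), i < 2 ^ xs.length →
    pvSel (xs ++ [x]) (2 ^ xs.length + i) = pvSel xs i ++ [x] := by
  induction xs with
  | nil =>
    intro i hi
    have : i = 0 := by simpa using hi
    subst this
    simp [pvSel]
  | cons y t ih =>
    intro i hi
    have hi' : i < 2 ^ (t.length + 1) := by simpa using hi
    have hp : 2 ^ (t.length + 1) = 2 ^ t.length * 2 := by ring
    have hmod : (2 ^ (t.length + 1) + i) % 2 = i % 2 := by omega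
    have hdiv : (2 ^ (t.length + 1) + i) / 2 = 2 ^ t.length + i / 2 := by omega
    have h2 : i / 2 < 2 ^ t.length := by omega
    simp only [List.cons_append, pvSel, List.length_cons, hmod, hdiv, ih (i / 2) h2]
    by_cases h : i % 2 = 1 <;> simp [h]

theorem pv_double (xs : List Int) :
    xs.foldl (fun result x => result ++ result.map (fun r => r ++ [x])) [[]]
    = (List.range (2 ^ xs.length)).map (pvSel xs) := by
  induction xs using List.reverseRecOn with
  | nil => simp [pvSel]
  | append_singleton t x ih =>
    rw [List.foldl_append, ih]
    simp only [List.foldl_cons, List.foldl_nil, List.length_append, List.length_singleton]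
    rw [show 2 ^ (t.length + 1) = 2 ^ t.length + 2 ^ t.length from by ring, List.range_add,
      List.map_append, List.map_map, List.map_map]
    congr 1
    · exact (List.map_congr_left (fun a ha => (pv_sel_snoc_lo t x a (List.mem_range.1 ha)).symm))
    · exact List.map_congr_left (fun a ha => by
        simp only [Function.comp_apply]
        exact (pv_sel_snoc_hi t x a (List.mem_range.1 ha)).symm)

theorem pv_slice {A : Type} (xs : List A) :
    PySem.List.slice xs (some 1) (some (-1)) = (xs.drop 1).take (xs.length - 2) := by
  cases xs with
  | nil => simp [PySem.List.slice]
  | cons y ys =>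
    simp only [PySem.List.slice, PySem.List.clampIdx]
    norm_num
    split_ifs <;> omega

theorem pv_pow_cast (L : Nat) : ((2 : Int) ^ L - 1 - 1).toNat = 2 ^ L - 2 := by
  have h : (2 : Int) ^ L = ((2 ^ L : Nat) : Int) := by push_cast; ring
  omega

theorem allProperSubset_eq (xs : List Int) :
    allProperSubset xs = (List.range (2 ^ xs.length - 2)).map (fun k => pvSel xs (1 + k)) := by
  unfold allProperSubset
  rw [PySem.List.foldl_append_singleton_eq_map, PySem.List.pyRange_one 1, List.map_map, pv_pow_cast]
  simp only [List.nil_append]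
  apply List.map_congr_left
  intro k _
  simp only [Function.comp_apply]
  rw [show pvSel xs (1 + k) = pvSel xs ((1 + (k : Int)).toNat) from by
    rw [show ((1 + (k : Int))).toNat = 1 + k from by omega]]
  exact pv_inner xs (1 + (k : Int)) (by positivity)

theorem allProperSubset_alt_eq (xs : List Int) :
    allProperSubset_alt xs = (List.range (2 ^ xs.length - 2)).map (fun k => pvSel xs (1 + k)) := by
  show PySem.List.slice
      (xs.foldl (fun result x => result ++ result.map (fun r => r ++ [x])) [[]]) (some 1) (some (-1))
      = _
  rw [pv_double, pv_slice]
  rw [List.length_map, List.length_range]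
  rw [← List.map_drop, ← List.map_take]
  rw [List.range_eq_range', List.drop_range']
  rw [show 0 + 1 * 1 = 1 from rfl]
  rw [show (List.range' 1 (2 ^ xs.length - 1)).take (2 ^ xs.length - 2)
        = List.range' 1 (2 ^ xs.length - 2) from by
    simp only [List.range'_eq_map_range, ← List.map_take, List.take_range]
    congr 2
    omega]
  rw [List.range'_eq_map_range, List.map_map]
  rfl

-- ===== VERDICT (by name: the statement is the Claim_ definition above) =====
theorem allProperSubset_spec : Claim_equal_allProperSubset := by
  intro xs _
  unfold Spec_allProperSubset
  rw [allProperSubset_eq, allProperSubset_alt_eq]
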